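-- pv_equiv track=rewrite | github.com/johnsel2000/comrades-explorer | scripts/export_data.py | best_medal
-- ===== SOURCE A (Python) =====
-- MEDAL_RANK = {
--     "Gold": 1,
--     "Wally Hayward": 2,
--     "Isavel Roche-Kelly": 3,
--     "Silver": 4,
--     "Bill Rowan": 5,
--     "Robert Mtshali": 6,
--     "Bronze": 7,
--     "Vic Clapham": 8,
-- }
--
-- def best_medal(medals: list[str]) -> str:
--     """Return the best medal from a list, using the hierarchy."""
--     best = None
--     best_rank = 999
--     for m in medals:
--         rank = MEDAL_RANK.get(m, 999)
--         if rank < best_rank: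
--             best_rank = rank
--             best = m
--     return best or ""
-- ===== SOURCE B (Python) =====
-- HIERARCHY = (
--     "Gold",
--     "Wally Hayward",
--     "Isavel Roche-Kelly",
--     "Silver",
--     "Bill Rowan",
--     "Robert Mtshali",
--     "Bronze",
--     "Vic Clapham",
-- )
--
-- def best_medal(medals: list[str]) -> str:
--     """Return the best medal from a list, using the hierarchy."""
--     present = set(medals)
--     for name in HIERARCHY:
--         if name in present:
--             return name
--     return ""
-- ===== Notes on version B (the rewrite author's own statement) =====
-- stated objective: idiomatic
-- what changed: Instead of scanning the medals list while tracking a running minimum rank, B builds a set of the medals once and walks the fixed 8-entry hierarchy in rank order, returning the first name present.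
import Mathlib
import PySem

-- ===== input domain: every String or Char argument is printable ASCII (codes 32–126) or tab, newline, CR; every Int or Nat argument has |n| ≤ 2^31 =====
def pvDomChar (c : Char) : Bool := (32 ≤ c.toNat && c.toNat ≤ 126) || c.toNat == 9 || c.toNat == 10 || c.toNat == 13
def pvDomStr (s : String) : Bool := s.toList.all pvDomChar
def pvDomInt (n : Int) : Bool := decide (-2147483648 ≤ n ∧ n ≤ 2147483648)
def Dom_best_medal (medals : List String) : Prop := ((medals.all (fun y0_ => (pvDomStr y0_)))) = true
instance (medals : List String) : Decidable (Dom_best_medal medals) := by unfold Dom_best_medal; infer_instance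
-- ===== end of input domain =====

-- B walks the fixed 8-entry hierarchy in rank order testing membership in a set of the input,
-- instead of A's running-minimum scan over the input; return values agree on all inputs (idiomatic rewrite).

-- ===== PORT A =====
def MEDAL_RANK : PySem.Dict String Int := PySem.Dict.ofList
  [("Gold", 1), ("Wally Hayward", 2), ("Isavel Roche-Kelly", 3), ("Silver", 4),
   ("Bill Rowan", 5), ("Robert Mtshali", 6), ("Bronze", 7), ("Vic Clapham", 8)]

-- loop body of A: state = (best, best_rank)
def bmStep (s : Option String × Int) (m : String) : Option String × Int :=
  let rank := MEDAL_RANK.getD m 999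
  if rank < s.2 then (some m, rank) else s

-- 'best or ""' : best is None or a non-empty medal name, so getD "" is exact
def best_medal (medals : List String) : String :=
  ((medals.foldl bmStep (none, 999)).1).getD ""

-- ===== PORT B =====
def HIERARCHY : List String :=
  ["Gold", "Wally Hayward", "Isavel Roche-Kelly", "Silver",
   "Bill Rowan", "Robert Mtshali", "Bronze", "Vic Clapham"]

-- 'for name in HIERARCHY: if name in present: return name' is List.find?; 'return ""' is getD ""
def best_medal_alt (medals : List String) : String :=
  let present : PySem.Set String := PySem.Set.ofList medals
  (HIERARCHY.find? (fun name => PySem.Set.contains present name)).getD ""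

-- ===== PRECONDITION & SPEC =====
def Spec_best_medal (medals : List String) (out : String) : Prop := out = best_medal_alt medals
instance (medals : List String) (out : String) : Decidable (Spec_best_medal medals out) := by unfold Spec_best_medal; infer_instance

-- ===== CLAIM (what is proved, stated in full; the proofs are below) =====
def Claim_equal_best_medal : Prop := ∀ (medals : List String), Dom_best_medal medals → Spec_best_medal medals (best_medal medals)

-- ===== LEMMAS AND PROOFS =====

-- find? over pre ++ m :: suf with the "∈ m :: rest" test: scan pre with "∈ rest", fall back to m
theorem find?_mem_cons (pre : List String) (m : String) (suf rest : List String)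
    (hm : m ∉ pre) :
    (pre ++ m :: suf).find? (fun n => decide (n ∈ m :: rest)) =
      (pre.find? (fun n => decide (n ∈ rest))).or (some m) := by
  induction pre with
  | nil => simp [List.find?]
  | cons a t iht =>
    have hma : a ≠ m := by intro e; exact hm (by simp [e])
    have hmt : m ∉ t := by intro e; exact hm (by simp [e])
    by_cases ha : a ∈ rest
    · rw [List.cons_append, List.find?_cons_of_pos (by simp [List.mem_cons, ha]),
          List.find?_cons_of_pos (by simp [ha])]
      rfl
    · rw [List.cons_append, List.find?_cons_of_neg (by simp [List.mem_cons, ha, hma]),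
          List.find?_cons_of_neg (by simp [ha]), iht hmt]

-- if m does not occur in pre, "∈ m :: rest" and "∈ rest" find the same element of pre
theorem find?_skip (pre : List String) (m : String) (rest : List String)
    (hm : m ∉ pre) :
    pre.find? (fun n => decide (n ∈ m :: rest)) = pre.find? (fun n => decide (n ∈ rest)) := by
  induction pre with
  | nil => rfl
  | cons a t iht =>
    have hma : a ≠ m := by intro e; exact hm (by simp [e])
    have hmt : m ∉ t := by intro e; exact hm (by simp [e])
    by_cases ha : a ∈ rest
    · rw [List.find?_cons_of_pos (by simp [List.mem_cons, ha]),
          List.find?_cons_of_pos (by simp [ha])]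
    · rw [List.find?_cons_of_neg (by simp [List.mem_cons, ha, hma]),
          List.find?_cons_of_neg (by simp [ha]), iht hmt]

-- any name among the first k hierarchy entries has rank ≤ k
theorem rank_mem_take (k : Nat) (hk : k ≤ 8) (m : String) (hm : m ∈ HIERARCHY.take k) :
    MEDAL_RANK.getD m 999 ≤ (k : Int) := by
  interval_cases k <;> fin_cases hm <;> decide

-- main invariant: A's fold from state (best, r) returns the first hierarchy name of rank < r
-- present in the remaining medals, falling back to best; reachable states have r = 999 (k = 8)
-- or r = k+1 for the picked rank k+1
theorem loop_char (medals : List String) : ∀ (best : Option String) (r : Int) (k : Nat),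
    ((k = 8 ∧ r = 999) ∨ (k ≤ 7 ∧ r = (k : Int) + 1)) →
    (medals.foldl bmStep (best, r)).1 =
      ((HIERARCHY.take k).find? (fun n => decide (n ∈ medals))).or best := by
  induction medals with
  | nil =>
    intro best r k hk
    rw [show (HIERARCHY.take k).find? (fun n => decide (n ∈ ([] : List String))) = none from
          List.find?_eq_none.mpr (by simp), Option.none_or]
    rfl
  | cons m rest ih =>
    intro best r k hk
    simp only [List.foldl_cons]
    by_cases h : MEDAL_RANK.getD m 999 < r
    · have hr999 : r ≤ 999 := by rcases hk with ⟨_, rfl⟩ | ⟨hk7, rfl⟩ <;> omega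
      by_cases h1 : m = "Gold"
      · subst h1
        have hrk : MEDAL_RANK.getD "Gold" 999 = 1 := by decide
        have hlt' : (1 : Int) < r := by rw [hrk] at h; exact h
        have hki : 1 ≤ k := by rcases hk with ⟨rfl, rfl⟩ | ⟨hk7, rfl⟩ <;> omega
        obtain ⟨j, rfl⟩ := Nat.exists_eq_add_of_le hki
        have hstep : bmStep (best, r) "Gold" = (some "Gold", 1) := by
          simp [bmStep, hrk, hlt']
        rw [hstep, ih (some "Gold") 1 0 (Or.inr ⟨by omega, by norm_num⟩)]
        have htake : HIERARCHY.take (1+j) = [] ++ "Gold" :: (HIERARCHY.drop 1).take j := by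
          rw [List.take_add]; rfl
        rw [htake, find?_mem_cons [] "Gold" _ rest (by decide),
            show HIERARCHY.take 0 = [] from rfl]
        cases [].find? (fun n => decide (n ∈ rest)) <;> simp
      by_cases h2 : m = "Wally Hayward"
      · subst h2
        have hrk : MEDAL_RANK.getD "Wally Hayward" 999 = 2 := by decide
        have hlt' : (2 : Int) < r := by rw [hrk] at h; exact h
        have hki : 2 ≤ k := by rcases hk with ⟨rfl, rfl⟩ | ⟨hk7, rfl⟩ <;> omega
        obtain ⟨j, rfl⟩ := Nat.exists_eq_add_of_le hki
        have hstep : bmStep (best, r) "Wally Hayward" = (some "Wally Hayward", 2) := by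
          simp [bmStep, hrk, hlt']
        rw [hstep, ih (some "Wally Hayward") 2 1 (Or.inr ⟨by omega, by norm_num⟩)]
        have htake : HIERARCHY.take (2+j) = ["Gold"] ++ "Wally Hayward" :: (HIERARCHY.drop 2).take j := by
          rw [List.take_add]; rfl
        rw [htake, find?_mem_cons ["Gold"] "Wally Hayward" _ rest (by decide),
            show HIERARCHY.take 1 = ["Gold"] from rfl]
        cases ["Gold"].find? (fun n => decide (n ∈ rest)) <;> simp
      by_cases h3 : m = "Isavel Roche-Kelly"
      · subst h3
        have hrk : MEDAL_RANK.getD "Isavel Roche-Kelly" 999 = 3 := by decide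
        have hlt' : (3 : Int) < r := by rw [hrk] at h; exact h
        have hki : 3 ≤ k := by rcases hk with ⟨rfl, rfl⟩ | ⟨hk7, rfl⟩ <;> omega
        obtain ⟨j, rfl⟩ := Nat.exists_eq_add_of_le hki
        have hstep : bmStep (best, r) "Isavel Roche-Kelly" = (some "Isavel Roche-Kelly", 3) := by
          simp [bmStep, hrk, hlt']
        rw [hstep, ih (some "Isavel Roche-Kelly") 3 2 (Or.inr ⟨by omega, by norm_num⟩)]
        have htake : HIERARCHY.take (3+j) = ["Gold", "Wally Hayward"] ++ "Isavel Roche-Kelly" :: (HIERARCHY.drop 3).take j := by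
          rw [List.take_add]; rfl
        rw [htake, find?_mem_cons ["Gold", "Wally Hayward"] "Isavel Roche-Kelly" _ rest (by decide),
            show HIERARCHY.take 2 = ["Gold", "Wally Hayward"] from rfl]
        cases ["Gold", "Wally Hayward"].find? (fun n => decide (n ∈ rest)) <;> simp
      by_cases h4 : m = "Silver"
      · subst h4
        have hrk : MEDAL_RANK.getD "Silver" 999 = 4 := by decide
        have hlt' : (4 : Int) < r := by rw [hrk] at h; exact h
        have hki : 4 ≤ k := by rcases hk with ⟨rfl, rfl⟩ | ⟨hk7, rfl⟩ <;> omega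
        obtain ⟨j, rfl⟩ := Nat.exists_eq_add_of_le hki
        have hstep : bmStep (best, r) "Silver" = (some "Silver", 4) := by
          simp [bmStep, hrk, hlt']
        rw [hstep, ih (some "Silver") 4 3 (Or.inr ⟨by omega, by norm_num⟩)]
        have htake : HIERARCHY.take (4+j) = ["Gold", "Wally Hayward", "Isavel Roche-Kelly"] ++ "Silver" :: (HIERARCHY.drop 4).take j := by
          rw [List.take_add]; rfl
        rw [htake, find?_mem_cons ["Gold", "Wally Hayward", "Isavel Roche-Kelly"] "Silver" _ rest (by decide),
            show HIERARCHY.take 3 = ["Gold", "Wally Hayward", "Isavel Roche-Kelly"] from rfl]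
        cases ["Gold", "Wally Hayward", "Isavel Roche-Kelly"].find? (fun n => decide (n ∈ rest)) <;> simp
      by_cases h5 : m = "Bill Rowan"
      · subst h5
        have hrk : MEDAL_RANK.getD "Bill Rowan" 999 = 5 := by decide
        have hlt' : (5 : Int) < r := by rw [hrk] at h; exact h
        have hki : 5 ≤ k := by rcases hk with ⟨rfl, rfl⟩ | ⟨hk7, rfl⟩ <;> omega
        obtain ⟨j, rfl⟩ := Nat.exists_eq_add_of_le hki
        have hstep : bmStep (best, r) "Bill Rowan" = (some "Bill Rowan", 5) := by
          simp [bmStep, hrk, hlt']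
        rw [hstep, ih (some "Bill Rowan") 5 4 (Or.inr ⟨by omega, by norm_num⟩)]
        have htake : HIERARCHY.take (5+j) = ["Gold", "Wally Hayward", "Isavel Roche-Kelly", "Silver"] ++ "Bill Rowan" :: (HIERARCHY.drop 5).take j := by
          rw [List.take_add]; rfl
        rw [htake, find?_mem_cons ["Gold", "Wally Hayward", "Isavel Roche-Kelly", "Silver"] "Bill Rowan" _ rest (by decide),
            show HIERARCHY.take 4 = ["Gold", "Wally Hayward", "Isavel Roche-Kelly", "Silver"] from rfl]
        cases ["Gold", "Wally Hayward", "Isavel Roche-Kelly", "Silver"].find? (fun n => decide (n ∈ rest)) <;> simp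
      by_cases h6 : m = "Robert Mtshali"
      · subst h6
        have hrk : MEDAL_RANK.getD "Robert Mtshali" 999 = 6 := by decide
        have hlt' : (6 : Int) < r := by rw [hrk] at h; exact h
        have hki : 6 ≤ k := by rcases hk with ⟨rfl, rfl⟩ | ⟨hk7, rfl⟩ <;> omega
        obtain ⟨j, rfl⟩ := Nat.exists_eq_add_of_le hki
        have hstep : bmStep (best, r) "Robert Mtshali" = (some "Robert Mtshali", 6) := by
          simp [bmStep, hrk, hlt']
        rw [hstep, ih (some "Robert Mtshali") 6 5 (Or.inr ⟨by omega, by norm_num⟩)]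
        have htake : HIERARCHY.take (6+j) = ["Gold", "Wally Hayward", "Isavel Roche-Kelly", "Silver", "Bill Rowan"] ++ "Robert Mtshali" :: (HIERARCHY.drop 6).take j := by
          rw [List.take_add]; rfl
        rw [htake, find?_mem_cons ["Gold", "Wally Hayward", "Isavel Roche-Kelly", "Silver", "Bill Rowan"] "Robert Mtshali" _ rest (by decide),
            show HIERARCHY.take 5 = ["Gold", "Wally Hayward", "Isavel Roche-Kelly", "Silver", "Bill Rowan"] from rfl]
        cases ["Gold", "Wally Hayward", "Isavel Roche-Kelly", "Silver", "Bill Rowan"].find? (fun n => decide (n ∈ rest)) <;> simp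
      by_cases h7 : m = "Bronze"
      · subst h7
        have hrk : MEDAL_RANK.getD "Bronze" 999 = 7 := by decide
        have hlt' : (7 : Int) < r := by rw [hrk] at h; exact h
        have hki : 7 ≤ k := by rcases hk with ⟨rfl, rfl⟩ | ⟨hk7, rfl⟩ <;> omega
        obtain ⟨j, rfl⟩ := Nat.exists_eq_add_of_le hki
        have hstep : bmStep (best, r) "Bronze" = (some "Bronze", 7) := by
          simp [bmStep, hrk, hlt']
        rw [hstep, ih (some "Bronze") 7 6 (Or.inr ⟨by omega, by norm_num⟩)]
        have htake : HIERARCHY.take (7+j) = ["Gold", "Wally Hayward", "Isavel Roche-Kelly", "Silver", "Bill Rowan", "Robert Mtshali"] ++ "Bronze" :: (HIERARCHY.drop 7).take j := by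
          rw [List.take_add]; rfl
        rw [htake, find?_mem_cons ["Gold", "Wally Hayward", "Isavel Roche-Kelly", "Silver", "Bill Rowan", "Robert Mtshali"] "Bronze" _ rest (by decide),
            show HIERARCHY.take 6 = ["Gold", "Wally Hayward", "Isavel Roche-Kelly", "Silver", "Bill Rowan", "Robert Mtshali"] from rfl]
        cases ["Gold", "Wally Hayward", "Isavel Roche-Kelly", "Silver", "Bill Rowan", "Robert Mtshali"].find? (fun n => decide (n ∈ rest)) <;> simp
      by_cases h8 : m = "Vic Clapham"
      · subst h8
        have hrk : MEDAL_RANK.getD "Vic Clapham" 999 = 8 := by decide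
        have hlt' : (8 : Int) < r := by rw [hrk] at h; exact h
        have hki : 8 ≤ k := by rcases hk with ⟨rfl, rfl⟩ | ⟨hk7, rfl⟩ <;> omega
        obtain ⟨j, rfl⟩ := Nat.exists_eq_add_of_le hki
        have hstep : bmStep (best, r) "Vic Clapham" = (some "Vic Clapham", 8) := by
          simp [bmStep, hrk, hlt']
        rw [hstep, ih (some "Vic Clapham") 8 7 (Or.inr ⟨by omega, by norm_num⟩)]
        have htake : HIERARCHY.take (8+j) = ["Gold", "Wally Hayward", "Isavel Roche-Kelly", "Silver", "Bill Rowan", "Robert Mtshali", "Bronze"] ++ "Vic Clapham" :: (HIERARCHY.drop 8).take j := by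
          rw [List.take_add]; rfl
        rw [htake, find?_mem_cons ["Gold", "Wally Hayward", "Isavel Roche-Kelly", "Silver", "Bill Rowan", "Robert Mtshali", "Bronze"] "Vic Clapham" _ rest (by decide),
            show HIERARCHY.take 7 = ["Gold", "Wally Hayward", "Isavel Roche-Kelly", "Silver", "Bill Rowan", "Robert Mtshali", "Bronze"] from rfl]
        cases ["Gold", "Wally Hayward", "Isavel Roche-Kelly", "Silver", "Bill Rowan", "Robert Mtshali", "Bronze"].find? (fun n => decide (n ∈ rest)) <;> simp
      exfalso
      have hmk : MEDAL_RANK = PySem.Dict.mk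
          [("Gold", 1), ("Wally Hayward", 2), ("Isavel Roche-Kelly", 3), ("Silver", 4),
           ("Bill Rowan", 5), ("Robert Mtshali", 6), ("Bronze", 7), ("Vic Clapham", 8)] := by rfl
      have hz : MEDAL_RANK.getD m 999 = 999 := by
        rw [hmk]
        simp [PySem.Dict.getD, Ne.symm h1, Ne.symm h2, Ne.symm h3,
              Ne.symm h4, Ne.symm h5, Ne.symm h6, Ne.symm h7, Ne.symm h8, PySem.Dict.get?]
      omega
    · have hstep : bmStep (best, r) m = (best, r) := by simp [bmStep, h]
      have hk8 : k ≤ 8 := by rcases hk with ⟨rfl, _⟩ | ⟨hk7, _⟩ <;> omega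
      have hm : m ∉ HIERARCHY.take k := by
        intro hmem
        have := rank_mem_take k hk8 m hmem
        rcases hk with ⟨rfl, rfl⟩ | ⟨hk7, rfl⟩ <;> omega
      rw [hstep, ih best r k hk, find?_skip _ m rest hm]

-- B's membership test over the deduplicated set agrees with membership in the input list
theorem contains_ofList (medals : List String) (n : String) :
    PySem.Set.contains (PySem.Set.ofList medals) n = decide (n ∈ medals) := by
  simp [PySem.Set.contains, PySem.Set.mem_ofList]

-- ===== VERDICT (by name: the statement is the Claim_ definition above) =====
theorem best_medal_spec : Claim_equal_best_medal := by
  intro medals _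
  unfold Spec_best_medal best_medal best_medal_alt
  rw [loop_char medals none 999 8 (Or.inl ⟨rfl, rfl⟩)]
  have hp : (fun name => PySem.Set.contains (PySem.Set.ofList medals) name) =
      (fun n => decide (n ∈ medals)) := by
    funext n; exact contains_ofList medals n
  simp only [hp, show HIERARCHY.take 8 = HIERARCHY from rfl, Option.or_none]
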